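-- pv_equiv track=rewrite | github.com/sebastianvne/COMP4432-Assignment1 | main.py | summarize_bricks
-- ===== SOURCE A (Python) =====
-- def summarize_bricks(bricks: list[tuple[int, int, int, int, int]]) -> str:
--     counts: dict[tuple[int, int], int] = {}
--     for _, _, bw, bh, _ in bricks:
--         key = (min(bw, bh), max(bw, bh))
--         counts[key] = counts.get(key, 0) + 1
--
--     total = len(bricks)
--     ordered_keys = sorted(counts, key=lambda k: (k[0] * k[1], k[1], k[0]), reverse=True)
--
--     lines = [f"Total bricks: {total}"]
--     for w, h in ordered_keys:
--         lines.append(f"{w}x{h}: {counts[(w, h)]}")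
--     return "\n".join(lines)
-- ===== SOURCE B (Python) =====
-- def summarize_bricks(bricks: list[tuple[int, int, int, int, int]]) -> str:
--     # Sort-then-group: normalize every brick's key, sort them all, count runs.
--     keys = sorted(((min(bw, bh), max(bw, bh)) for _, _, bw, bh, _ in bricks),
--                   key=lambda k: (k[0] * k[1], k[1], k[0]), reverse=True)
--     lines = [f"Total bricks: {len(bricks)}"]
--     i, n = 0, len(keys)
--     while i < n:
--         j = i + 1
--         while j < n and keys[j] == keys[i]:
--             j += 1
--         w, h = keys[i]
--         lines.append(f"{w}x{h}: {j - i}")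
--         i = j
--     return "\n".join(lines)
-- ===== Notes on version B (the rewrite author's own statement) =====
-- stated objective: alternative
-- what changed: Replaced A's hash-table counting plus sort of the distinct keys by a single sort of all normalized keys followed by a run-length grouping scan that emits one line per run.
import Mathlib
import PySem

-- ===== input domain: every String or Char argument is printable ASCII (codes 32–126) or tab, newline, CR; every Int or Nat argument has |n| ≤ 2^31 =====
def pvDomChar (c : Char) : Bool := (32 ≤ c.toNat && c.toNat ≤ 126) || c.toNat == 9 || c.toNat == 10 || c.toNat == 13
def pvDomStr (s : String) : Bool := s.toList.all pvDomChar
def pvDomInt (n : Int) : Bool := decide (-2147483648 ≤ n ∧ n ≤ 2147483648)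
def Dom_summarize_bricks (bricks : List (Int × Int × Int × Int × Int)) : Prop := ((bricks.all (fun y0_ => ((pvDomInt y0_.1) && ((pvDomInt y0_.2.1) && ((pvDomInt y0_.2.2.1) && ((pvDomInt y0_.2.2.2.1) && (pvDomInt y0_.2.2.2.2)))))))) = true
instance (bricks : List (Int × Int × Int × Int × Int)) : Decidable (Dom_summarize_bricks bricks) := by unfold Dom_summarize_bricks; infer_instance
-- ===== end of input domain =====

-- B replaces A's hash-table count + sort-of-distinct-keys by one sort of ALL normalized
-- keys followed by a run-length grouping scan (objective: alternative, same cost).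

-- ===== PORT A =====
-- Python tuple key (k0*k1, k1, k0) compared lexicographically → Lex (Int × Lex (Int × Int))
def summarize_bricks (bricks : List (Int × Int × Int × Int × Int)) : String :=
  let counts := bricks.foldl (fun d b =>
      let key : Int × Int := (min b.2.2.1 b.2.2.2.1, max b.2.2.1 b.2.2.2.1)
      d.insert key (d.getD key 0 + 1)) PySem.Dict.empty
  let total : Int := (bricks.length : Int)
  let ordered_keys := PySem.List.sorted counts.keys
      (fun k => toLex (k.1 * k.2, toLex (k.2, k.1))) true
  let lines := ["Total bricks: " ++ PySem.Int.toStr total]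
  -- counts[(w,h)] never raises: every k in ordered_keys is a key of counts, so getD is exact here
  let lines := ordered_keys.foldl (fun ls k =>
      ls ++ [PySem.Int.toStr k.1 ++ "x" ++ PySem.Int.toStr k.2 ++ ": " ++
             PySem.Int.toStr (counts.getD k 0)]) lines
  PySem.Str.join "\n" lines

-- ===== PORT B =====
-- the inner while loop of Source B: emit one line per run of equal keys in the sorted list
def pvRunLines : List (Int × Int) → List String
  | [] => []
  | k :: t =>
    (PySem.Int.toStr k.1 ++ "x" ++ PySem.Int.toStr k.2 ++ ": " ++
     PySem.Int.toStr (1 + ((t.takeWhile (fun x => x == k)).length : Int)))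
      :: pvRunLines (t.dropWhile (fun x => x == k))
termination_by l => l.length
decreasing_by
  exact Nat.lt_succ_of_le (List.length_dropWhile_le _ _)

def summarize_bricks_alt (bricks : List (Int × Int × Int × Int × Int)) : String :=
  let keys := PySem.List.sorted
      (bricks.map (fun b => ((min b.2.2.1 b.2.2.2.1, max b.2.2.1 b.2.2.2.1) : Int × Int)))
      (fun k => toLex (k.1 * k.2, toLex (k.2, k.1))) true
  PySem.Str.join "\n"
    (("Total bricks: " ++ PySem.Int.toStr (bricks.length : Int)) :: pvRunLines keys)

-- ===== PRECONDITION & SPEC =====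
def Spec_summarize_bricks (bricks : List (Int × Int × Int × Int × Int)) (out : String) : Prop := out = summarize_bricks_alt bricks
instance (bricks : List (Int × Int × Int × Int × Int)) (out : String) : Decidable (Spec_summarize_bricks bricks out) := by unfold Spec_summarize_bricks; infer_instance

-- ===== CLAIM (what is proved, stated in full; the proofs are below) =====
def Claim_equal_summarize_bricks : Prop := ∀ (bricks : List (Int × Int × Int × Int × Int)), Dom_summarize_bricks bricks → Spec_summarize_bricks bricks (summarize_bricks bricks)

-- ===== LEMMAS AND PROOFS =====

-- the shared sort key, and its injectivity
def pvKeyF (k : Int × Int) : Lex (Int × Lex (Int × Int)) := toLex (k.1 * k.2, toLex (k.2, k.1))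

lemma pvKeyF_inj : Function.Injective pvKeyF := by
  intro a b h
  unfold pvKeyF at h
  have h1 := toLex.injective h
  have h2 := toLex.injective (congrArg Prod.snd h1)
  have : a.2 = b.2 := congrArg Prod.fst h2
  have : a.1 = b.1 := congrArg Prod.snd h2
  exact Prod.ext ‹a.1 = b.1› ‹a.2 = b.2›

-- A's loop body over bricks equals the counter fold over the mapped keys
lemma pv_counts_eq (bricks : List (Int × Int × Int × Int × Int)) :
    bricks.foldl (fun d b =>
      let key : Int × Int := (min b.2.2.1 b.2.2.2.1, max b.2.2.1 b.2.2.2.1)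
      d.insert key (d.getD key 0 + 1)) PySem.Dict.empty
    = PySem.Dict.counter
        (bricks.map (fun b => ((min b.2.2.1 b.2.2.2.1, max b.2.2.1 b.2.2.2.1) : Int × Int))) := by
  rw [← PySem.Dict.foldl_insert_getD_add_one_eq_counter, List.foldl_map]

-- folding "append one line" is mapping
lemma pv_foldl_append_map {α : Type} (g : α → String) :
    ∀ (l : List α) (init : List String),
      l.foldl (fun ls k => ls ++ [g k]) init = init ++ l.map g := by
  intro l
  induction l with
  | nil => intro init; simp
  | cons x t ih => intro init; simp [ih]

-- counting inside the block decomposition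
lemma pv_count_flatMap (xs : List (Int × Int)) :
    ∀ (S : List (Int × Int)), S.Nodup → ∀ a : Int × Int,
      (S.flatMap (fun k => List.replicate (xs.count k) k)).count a
        = if a ∈ S then xs.count a else 0 := by
  intro S
  induction S with
  | nil => intro _ a; simp
  | cons k t ih =>
    intro hnd a
    rcases List.nodup_cons.mp hnd with ⟨hk, hnd'⟩
    rw [List.flatMap_cons, List.count_append, ih hnd' a, List.count_replicate]
    by_cases hak : a = k
    · subst hak
      simp [hk]
    · have : (k == a) = false := by simp [Ne.symm hak]
      simp [this, hak]

lemma pv_flat_perm (xs : List (Int × Int)) (S : List (Int × Int))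
    (hnd : S.Nodup) (hmem : ∀ a, a ∈ S ↔ a ∈ xs) :
    (S.flatMap (fun k => List.replicate (xs.count k) k)).Perm xs := by
  rw [List.perm_iff_count]
  intro a
  rw [pv_count_flatMap xs S hnd a]
  by_cases h : a ∈ S
  · simp [h]
  · have : a ∉ xs := fun hx => h ((hmem a).mpr hx)
    simp [h, List.count_eq_zero_of_not_mem this]

-- the sorted list of all keys is the blocks of the sorted distinct keys
lemma pv_sorted_blocks (xs : List (Int × Int)) :
    PySem.List.sorted xs pvKeyF true
      = (PySem.List.sorted (PySem.Set.ofList xs) pvKeyF true).flatMap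
          (fun k => List.replicate (xs.count k) k) := by
  set S := PySem.List.sorted (PySem.Set.ofList xs) pvKeyF true with hS
  have hSperm : S.Perm (PySem.Set.ofList xs) := PySem.List.sorted_perm _ _ _
  have hSnd : S.Nodup := hSperm.symm.nodup (PySem.Set.nodup_ofList xs)
  have hSmem : ∀ a, a ∈ S ↔ a ∈ xs := by
    intro a
    rw [hSperm.mem_iff]
    exact PySem.Set.mem_ofList xs a
  have hSle : S.Pairwise (fun a b => pvKeyF b ≤ pvKeyF a) :=
    PySem.List.sorted_pairwise_rev _ _
  -- S is strictly decreasing under pvKeyF (nodup + injective key)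
  have hSlt : S.Pairwise (fun a b => pvKeyF b < pvKeyF a) := by
    have := hSle.and (List.nodup_iff_pairwise_ne.mp hSnd)
    exact this.imp (fun {a b} h => lt_of_le_of_ne h.1 (fun he => h.2 (pvKeyF_inj he).symm))
  apply List.Perm.eq_of_pairwise
      (le := fun a b => pvKeyF b ≤ pvKeyF a)
  · intro a b _ _ h1 h2
    exact pvKeyF_inj (le_antisymm h2 h1)
  · exact PySem.List.sorted_pairwise_rev _ _
  · rw [List.pairwise_flatMap]
    constructor
    · intro a _
      rw [List.pairwise_replicate]
      right; exact le_refl _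
    · exact hSlt.imp (fun {a b} h => by
        intro x hx y hy
        rw [List.eq_of_mem_replicate hx, List.eq_of_mem_replicate hy]
        exact le_of_lt h)
  · exact (PySem.List.sorted_perm _ _ _).trans
      (pv_flat_perm xs S hSnd hSmem).symm

-- grouping the block decomposition yields one line per distinct key with its count
lemma pv_runLines_blocks (xs : List (Int × Int)) :
    ∀ (S : List (Int × Int)), S.Nodup → (∀ k ∈ S, k ∈ xs) →
      pvRunLines (S.flatMap (fun k => List.replicate (xs.count k) k))
        = S.map (fun k => PySem.Int.toStr k.1 ++ "x" ++ PySem.Int.toStr k.2 ++ ": " ++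
                          PySem.Int.toStr ((xs.count k : Int))) := by
  intro S
  induction S with
  | nil => intro _ _; simp [pvRunLines]
  | cons k t ih =>
    intro hnd hmem
    rcases List.nodup_cons.mp hnd with ⟨hk, hnd'⟩
    have hpos : 0 < xs.count k := List.count_pos_iff.mpr (hmem k (List.mem_cons_self))
    set rest := t.flatMap (fun k => List.replicate (xs.count k) k) with hrest
    have hrestne : ∀ x ∈ rest, (x == k) = false := by
      intro x hx
      rcases List.mem_flatMap.mp hx with ⟨k', hk', hxk'⟩
      have hxk : x = k' := List.eq_of_mem_replicate hxk'
      have : k' ≠ k := fun he => hk (he ▸ hk')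
      simp [hxk, this]
    have hrep : List.replicate (xs.count k) k = k :: List.replicate (xs.count k - 1) k := by
      rw [← List.replicate_succ]
      congr 1
      omega
    have htakerest : rest.takeWhile (fun x => x == k) = [] := by
      cases hr : rest with
      | nil => simp
      | cons r rt =>
        have := hrestne r (by rw [hr]; exact List.mem_cons_self)
        simp [this]
    have hdroprest : rest.dropWhile (fun x => x == k) = rest := by
      cases hr : rest with
      | nil => simp
      | cons r rt =>
        have := hrestne r (by rw [hr]; exact List.mem_cons_self)
        simp [this]
    rw [List.flatMap_cons, ← hrest, hrep]
    show pvRunLines (k :: (List.replicate (xs.count k - 1) k ++ rest)) = _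
    rw [pvRunLines]
    have htake : (List.replicate (xs.count k - 1) k ++ rest).takeWhile (fun x => x == k)
        = List.replicate (xs.count k - 1) k := by
      rw [List.takeWhile_append]
      simp [htakerest]
    have hdrop : (List.replicate (xs.count k - 1) k ++ rest).dropWhile (fun x => x == k)
        = rest := by
      rw [List.dropWhile_append]
      simp [hdroprest]
    rw [htake, hdrop, ih hnd' (fun k' hk' => hmem k' (List.mem_cons_of_mem _ hk'))]
    rw [List.map_cons]
    congr 2
    rw [List.length_replicate]
    congr 1
    omega

-- ===== VERDICT (by name: the statement is the Claim_ definition above) =====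
theorem summarize_bricks_spec : Claim_equal_summarize_bricks := by
  intro bricks _
  show summarize_bricks bricks = summarize_bricks_alt bricks
  simp only [summarize_bricks, summarize_bricks_alt]
  rw [pv_counts_eq bricks]
  set xs := bricks.map (fun b => ((min b.2.2.1 b.2.2.2.1, max b.2.2.1 b.2.2.2.1) : Int × Int))
    with hxs
  rw [PySem.Dict.keys_counter]
  have hSperm : (PySem.List.sorted (PySem.Set.ofList xs) pvKeyF true).Perm
      (PySem.Set.ofList xs) := PySem.List.sorted_perm _ _ _
  have hSnd : (PySem.List.sorted (PySem.Set.ofList xs) pvKeyF true).Nodup :=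
    hSperm.symm.nodup (PySem.Set.nodup_ofList xs)
  have hSmem : ∀ k ∈ PySem.List.sorted (PySem.Set.ofList xs) pvKeyF true, k ∈ xs := by
    intro k hk
    exact (PySem.Set.mem_ofList xs k).mp (hSperm.mem_iff.mp hk)
  show PySem.Str.join "\n"
      ((PySem.List.sorted (PySem.Set.ofList xs) pvKeyF true).foldl _
        ["Total bricks: " ++ PySem.Int.toStr (bricks.length : Int)])
    = PySem.Str.join "\n" (_ :: pvRunLines (PySem.List.sorted xs pvKeyF true))
  rw [pv_foldl_append_map, pv_sorted_blocks xs,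
      pv_runLines_blocks xs _ hSnd hSmem]
  simp only [List.cons_append, List.nil_append]
  congr 1
  congr 1
  apply List.map_congr_left
  intro k hk
  rw [PySem.Dict.getD_counter]
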